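-- pv_equiv track=rewrite | github.com/mequanwei/MarketProfiler | utils/import_data.py | build_parent_map
-- ===== SOURCE A (Python) =====
-- def build_parent_map(id_parent_pairs):
--     # 1. 构建 {id: parent_id} 字典
--     parent_dict = {child: parent for child, parent in id_parent_pairs}
--
--     # 2. 递归查找所有父级
--     def find_parents(item_id):
--         path = []
--         while item_id is not None:
--             path.append(item_id)  # 添加当前 id
--             item_id = parent_dict.get(item_id)  # 获取父 id
--         return path  # 结束时返回完整路径
--
--     # 3. 构建 {id: [自己 → 顶层父 id]} 的字典
--     hierarchy_map = {item: find_parents(item) for item in parent_dict}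
--     return hierarchy_map
-- ===== SOURCE B (Python) =====
-- def build_parent_map(id_parent_pairs):
--     parent_dict = {child: parent for child, parent in id_parent_pairs}
--     memo = {}
--
--     def path_of(item_id):
--         # ascend until a node with a known path (or no parent), stacking nodes
--         stack = []
--         cur = item_id
--         while cur is not None and cur not in memo:
--             stack.append(cur)
--             cur = parent_dict.get(cur)
--         tail = [] if cur is None else memo[cur]
--         # unwind: each node's path is itself followed by its parent's path
--         for node in reversed(stack):
--             tail = [node] + tail
--             memo[node] = tail
--         return tail
--
--     return {item: path_of(item) for item in parent_dict}
-- ===== Notes on version B (the rewrite author's own statement) =====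
-- stated objective: alternative
-- what changed: A recomputes every ancestor chain from scratch with an independent upward while-loop per id; B ascends only until a node with an already-known path (memo), then unwinds the stack once, so each id's path is computed a single time and shared as the tail of its descendants' paths.
import Mathlib
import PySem

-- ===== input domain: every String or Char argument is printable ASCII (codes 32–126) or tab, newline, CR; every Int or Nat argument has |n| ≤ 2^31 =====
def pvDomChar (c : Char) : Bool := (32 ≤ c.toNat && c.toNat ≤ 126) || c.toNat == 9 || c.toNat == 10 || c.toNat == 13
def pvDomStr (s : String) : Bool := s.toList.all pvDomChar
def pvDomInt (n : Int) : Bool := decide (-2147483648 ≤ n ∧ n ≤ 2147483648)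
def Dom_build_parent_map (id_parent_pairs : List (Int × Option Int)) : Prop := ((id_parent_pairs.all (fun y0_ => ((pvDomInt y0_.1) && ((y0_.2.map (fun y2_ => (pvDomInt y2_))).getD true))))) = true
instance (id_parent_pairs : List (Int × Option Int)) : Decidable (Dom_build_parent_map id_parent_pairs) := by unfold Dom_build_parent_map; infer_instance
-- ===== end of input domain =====

-- B replaces A's independent upward walk per id (recomputing shared ancestor chains) by a
-- memoized ascent: each id's path is computed once and reused as the tail of its children's paths.
-- Equivalence is about the RETURN value (neither program mutates its argument).

-- ===== PORT A =====
-- the Python dict {child: parent} built by the comprehension (helper shared with Pre_)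
def pvPD (pairs : List (Int × Option Int)) : PySem.Dict Int (Option Int) :=
  pairs.foldl (fun d cp => d.insert cp.1 cp.2) PySem.Dict.empty

-- parent_dict.get(k): None both when k is absent and when it maps to None
def pvNext (d : PySem.Dict Int (Option Int)) (k : Int) : Option Int :=
  (d.get? k).getD none

-- the while loop of find_parents; the fuel only totalizes it (keys.length + 1 suffices under Pre_)
def pvFindParents (d : PySem.Dict Int (Option Int)) : Nat → Option Int → List Int → List Int
  | _, none, path => path
  | 0, some _, path => path
  | f+1, some k, path => pvFindParents d f (pvNext d k) (path ++ [k])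

def build_parent_map (id_parent_pairs : List (Int × Option Int)) : List (Int × List Int) :=
  ((pvPD id_parent_pairs).keys.foldl
    (fun h k => h.insert k
      (pvFindParents (pvPD id_parent_pairs) ((pvPD id_parent_pairs).keys.length + 1) (some k) []))
    PySem.Dict.empty).items

-- ===== PORT B =====
-- the ascending while loop of path_of: stack the ids not yet in memo, stop at None or a memo hit
def pvAscend (d : PySem.Dict Int (Option Int)) :
    Nat → PySem.Dict Int (List Int) → Option Int → List Int × Option Int
  | 0, _, it => ([], it)
  | _+1, _, none => ([], none)
  | f+1, memo, some k =>
    if memo.contains k then ([], some k)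
    else
      let r := pvAscend d f memo (pvNext d k)
      (k :: r.1, r.2)

-- path_of: ascend, then unwind the stack, recording each id's path in memo
def pvPathOf (d : PySem.Dict Int (Option Int)) (fuel : Nat)
    (memo : PySem.Dict Int (List Int)) (k : Int) : List Int × PySem.Dict Int (List Int) :=
  let a := pvAscend d fuel memo (some k)
  let tail0 : List Int := match a.2 with | none => [] | some j => memo.getD j []
  a.1.reverse.foldl (fun acc node => (node :: acc.1, acc.2.insert node (node :: acc.1))) (tail0, memo)

def build_parent_map_alt (id_parent_pairs : List (Int × Option Int)) : List (Int × List Int) :=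
  ((pvPD id_parent_pairs).keys.foldl
    (fun acc k =>
      let r := pvPathOf (pvPD id_parent_pairs) ((pvPD id_parent_pairs).keys.length + 1) acc.2 k
      (acc.1.insert k r.1, r.2))
    ((PySem.Dict.empty : PySem.Dict Int (List Int)), (PySem.Dict.empty : PySem.Dict Int (List Int)))).1.items

-- ===== PRECONDITION & SPEC =====
-- the ids reachable by iterating the parent map at most `f` times, starting from `it`
def pvIter (d : PySem.Dict Int (Option Int)) : Nat → Option Int → List Int
  | 0, _ => []
  | _+1, none => []
  | f+1, some k => k :: pvIter d f (pvNext d k)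

-- Pre_ excludes inputs whose parent relation has a cycle (some id reaches itself again):
-- on those Python A's while loop never terminates, so A returns on exactly the inputs admitted here.
def Pre_build_parent_map (id_parent_pairs : List (Int × Option Int)) : Prop :=
  ∀ k ∈ (pvPD id_parent_pairs).keys,
    k ∉ pvIter (pvPD id_parent_pairs) ((pvPD id_parent_pairs).keys.length + 1)
          (pvNext (pvPD id_parent_pairs) k)
instance (id_parent_pairs : List (Int × Option Int)) : Decidable (Pre_build_parent_map id_parent_pairs) := by
  unfold Pre_build_parent_map; infer_instance

def pvWitness_build_parent_map : (List (Int × Option Int)) := [(1, some 2), (2, none), (3, some 9)]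

def Spec_build_parent_map (id_parent_pairs : List (Int × Option Int)) (out : List (Int × List Int)) : Prop := out = build_parent_map_alt id_parent_pairs
instance (id_parent_pairs : List (Int × Option Int)) (out : List (Int × List Int)) : Decidable (Spec_build_parent_map id_parent_pairs out) := by unfold Spec_build_parent_map; infer_instance

-- ===== CLAIM (what is proved, stated in full; the proofs are below) =====
def Claim_equal_build_parent_map : Prop := ∀ (id_parent_pairs : List (Int × Option Int)), Dom_build_parent_map id_parent_pairs → Pre_build_parent_map id_parent_pairs → Spec_build_parent_map id_parent_pairs (build_parent_map id_parent_pairs)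

-- ===== LEMMAS AND PROOFS =====

-- the while loop of find_parents terminates within `f` iterations from `it`
def pvTerm (d : PySem.Dict Int (Option Int)) : Nat → Option Int → Bool
  | _, none => true
  | 0, some _ => false
  | f+1, some k => pvTerm d f (pvNext d k)

theorem pvFP_append (d : PySem.Dict Int (Option Int)) :
    ∀ (f : Nat) (it : Option Int) (path : List Int),
      pvFindParents d f it path = path ++ pvFindParents d f it []
  | f, none, path => by cases f <;> simp [pvFindParents]
  | 0, some k, path => by simp [pvFindParents]
  | f+1, some k, path => by
    simp only [pvFindParents]
    rw [pvFP_append d f _ (path ++ [k]), pvFP_append d f _ ([] ++ [k])]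
    simp

theorem pvFP_stable (d : PySem.Dict Int (Option Int)) :
    ∀ (f g : Nat) (it : Option Int), pvTerm d f it = true → f ≤ g →
      pvFindParents d g it [] = pvFindParents d f it [] := by
  intro f
  induction f with
  | zero =>
    intro g it ht _
    cases it with
    | none => cases g <;> simp [pvFindParents]
    | some k => simp [pvTerm] at ht
  | succ f ih =>
    intro g it ht hle
    cases it with
    | none => cases g <;> simp [pvFindParents]
    | some k =>
      cases g with
      | zero => omega
      | succ g' =>
        simp only [pvFindParents]
        have ht' : pvTerm d f (pvNext d k) = true := ht
        rw [pvFP_append d g' (pvNext d k) ([] ++ [k]), pvFP_append d f (pvNext d k) ([] ++ [k]),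
          ih g' _ ht' (by omega)]

theorem pvIter_mono (d : PySem.Dict Int (Option Int)) :
    ∀ (f g : Nat) (it : Option Int) (x : Int), f ≤ g →
      x ∈ pvIter d f it → x ∈ pvIter d g it := by
  intro f
  induction f with
  | zero => intro g it x _ hx; simp [pvIter] at hx
  | succ f ih =>
    intro g it x hle hx
    cases it with
    | none => simp [pvIter] at hx
    | some k =>
      cases g with
      | zero => omega
      | succ g' =>
        simp only [pvIter, List.mem_cons] at hx ⊢
        rcases hx with h | h
        · exact Or.inl h
        · exact Or.inr (ih g' _ x (by omega) h)

theorem pvIter_keys (d : PySem.Dict Int (Option Int)) :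
    ∀ (f : Nat) (it : Option Int), pvTerm d f it = false →
      ∀ x ∈ pvIter d f it, x ∈ d.keys := by
  intro f
  induction f with
  | zero => intro it _ x hx; simp [pvIter] at hx
  | succ f ih =>
    intro it ht x hx
    cases it with
    | none => simp [pvTerm] at ht
    | some k =>
      have ht' : pvTerm d f (pvNext d k) = false := ht
      simp only [pvIter, List.mem_cons] at hx
      rcases hx with rfl | h
      · by_contra hk
        have hg : d.get? x = none := (PySem.Dict.get?_eq_none_iff_not_mem_keys d x).mpr hk
        have : pvNext d x = none := by simp [pvNext, hg]
        rw [this] at ht'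
        simp [pvTerm] at ht'
      · exact ih _ ht' x h

theorem pvIter_len (d : PySem.Dict Int (Option Int)) :
    ∀ (f : Nat) (it : Option Int), pvTerm d f it = false →
      (pvIter d f it).length = f := by
  intro f
  induction f with
  | zero => intro it _; simp [pvIter]
  | succ f ih =>
    intro it ht
    cases it with
    | none => simp [pvTerm] at ht
    | some k =>
      have ht' : pvTerm d f (pvNext d k) = false := ht
      simp [pvIter, ih _ ht']

theorem pvIter_dup (d : PySem.Dict Int (Option Int)) :
    ∀ (f : Nat) (it : Option Int) (x : Int), [x, x].Sublist (pvIter d f it) →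
      x ∈ pvIter d f (pvNext d x) := by
  intro f
  induction f with
  | zero =>
    intro it x h
    simp [pvIter] at h
  | succ f ih =>
    intro it x h
    cases it with
    | none => simp [pvIter] at h
    | some k =>
      simp only [pvIter] at h
      cases h with
      | cons _ h' =>
        exact pvIter_mono d f (f+1) _ x (by omega) (ih _ x h')
      | cons₂ _ h' =>
        have hx : x ∈ pvIter d f (pvNext d x) := h'.subset (by simp)

        exact pvIter_mono d f (f+1) _ x (by omega) hx

theorem pvTerm_all (pairs : List (Int × Option Int))
    (hpre : Pre_build_parent_map pairs) :
    ∀ it, pvTerm (pvPD pairs) ((pvPD pairs).keys.length + 1) it = true := by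
  intro it
  set d := pvPD pairs with hd
  set n := d.keys.length with hn
  cases it with
  | none => simp [pvTerm]
  | some k =>
    by_contra hne
    have ht : pvTerm d (n + 1) (some k) = false := by
      cases hb : pvTerm d (n + 1) (some k)
      · rfl
      · exact absurd hb hne
    have hlen : (pvIter d (n + 1) (some k)).length = n + 1 := pvIter_len d _ _ ht
    have hkeys : ∀ x ∈ pvIter d (n + 1) (some k), x ∈ d.keys := pvIter_keys d _ _ ht
    have hnodup : ¬ (pvIter d (n + 1) (some k)).Nodup := by
      intro hnd
      have hle : (pvIter d (n + 1) (some k)).length ≤ d.keys.length := by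
        classical
        calc (pvIter d (n + 1) (some k)).length
            = (pvIter d (n + 1) (some k)).toFinset.card := (List.toFinset_card_of_nodup hnd).symm
          _ ≤ d.keys.toFinset.card := Finset.card_le_card (by
              intro x hx; simp only [List.mem_toFinset] at *; exact hkeys x hx)
          _ ≤ d.keys.length := d.keys.toFinset_card_le
      omega
    obtain ⟨x, hx⟩ := List.exists_duplicate_iff_not_nodup.mpr hnodup
    have hsub : [x, x].Sublist (pvIter d (n + 1) (some k)) := List.duplicate_iff_sublist.mp hx
    have hmem : x ∈ pvIter d (n + 1) (pvNext d x) := pvIter_dup d _ _ x hsub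
    have hxk : x ∈ d.keys := hkeys x hx.mem
    exact hpre x hxk hmem

-- one unfolding of A's walk: each id's full path is itself followed by its parent's full path
theorem pvFP_unfold (d : PySem.Dict Int (Option Int))
    (hT : ∀ it, pvTerm d (d.keys.length + 1) it = true) (k : Int) :
    pvFindParents d (d.keys.length + 1) (some k) [] =
      k :: (match pvNext d k with
            | none => []
            | some p => pvFindParents d (d.keys.length + 1) (some p) []) := by
  have h1 : pvFindParents d (d.keys.length + 1) (some k) []
      = [k] ++ pvFindParents d d.keys.length (pvNext d k) [] := by
    simp only [pvFindParents]
    rw [pvFP_append d d.keys.length (pvNext d k) ([] ++ [k])]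
    simp
  rw [h1]
  cases hp : pvNext d k with
  | none => simp [pvFindParents]
  | some p =>
    have ht : pvTerm d d.keys.length (some p) = true := by
      have := hT (some k)
      simp only [pvTerm, hp] at this
      exact this
    rw [← pvFP_stable d d.keys.length (d.keys.length + 1) (some p) ht (by omega)]
    simp

-- invariant of B's memo: every recorded path is A's walk for that id
def pvInv (d : PySem.Dict Int (Option Int)) (memo : PySem.Dict Int (List Int)) : Prop :=
  ∀ k v, memo.get? k = some v → v = pvFindParents d (d.keys.length + 1) (some k) []

theorem pvAscendUnwind_spec (d : PySem.Dict Int (Option Int))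
    (hT : ∀ it, pvTerm d (d.keys.length + 1) it = true) :
    ∀ (f : Nat) (it : Option Int) (memo : PySem.Dict Int (List Int)),
      pvTerm d f it = true → pvInv d memo →
      (((pvAscend d f memo it).1.reverse.foldl
          (fun acc node => (node :: acc.1, acc.2.insert node (node :: acc.1)))
          ((match (pvAscend d f memo it).2 with
            | none => ([] : List Int)
            | some j => memo.getD j []), memo)).1
        = (match it with
           | none => []
           | some k => pvFindParents d (d.keys.length + 1) (some k) []))
      ∧ pvInv d ((pvAscend d f memo it).1.reverse.foldl
          (fun acc node => (node :: acc.1, acc.2.insert node (node :: acc.1)))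
          ((match (pvAscend d f memo it).2 with
            | none => ([] : List Int)
            | some j => memo.getD j []), memo)).2 := by
  intro f
  induction f with
  | zero =>
    intro it memo ht hinv
    cases it with
    | none => exact ⟨rfl, hinv⟩
    | some k => simp [pvTerm] at ht
  | succ f ih =>
    intro it memo ht hinv
    cases it with
    | none => exact ⟨rfl, hinv⟩
    | some k =>
      cases hc : memo.contains k with
      | true =>
        have hs : (memo.get? k).isSome = true := by
          rw [← PySem.Dict.contains_eq_isSome_get?]; exact hc
        obtain ⟨v, hv⟩ := Option.isSome_iff_exists.mp hs
        have hvW := hinv k v hv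
        simp only [pvAscend, hc, if_true, List.reverse_nil, List.foldl_nil]
        exact ⟨by rw [PySem.Dict.getD_of_get?_eq_some memo [] hv]; exact hvW, hinv⟩
      | false =>
        have ht' : pvTerm d f (pvNext d k) = true := ht
        obtain ⟨h1, h2⟩ := ih (pvNext d k) memo ht' hinv
        simp only [pvAscend, hc, Bool.false_eq_true, if_false, List.reverse_cons,
          List.foldl_append, List.foldl_cons, List.foldl_nil]
        constructor
        · rw [pvFP_unfold d hT k, h1]
        · intro k' v' hg
          rw [PySem.Dict.get?_insert] at hg
          split_ifs at hg with he
          · cases hg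
            subst he
            rw [pvFP_unfold d hT k', h1]
          · exact h2 k' v' hg

theorem pvFold_eq (d : PySem.Dict Int (Option Int))
    (hT : ∀ it, pvTerm d (d.keys.length + 1) it = true) :
    ∀ (ks : List Int) (out : PySem.Dict Int (List Int)) (memo : PySem.Dict Int (List Int)),
      pvInv d memo →
      (ks.foldl
        (fun acc k =>
          let r := pvPathOf d (d.keys.length + 1) acc.2 k
          (acc.1.insert k r.1, r.2))
        (out, memo)).1
      = ks.foldl (fun h k => h.insert k (pvFindParents d (d.keys.length + 1) (some k) [])) out := by
  intro ks
  induction ks with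
  | nil => intro out memo _; rfl
  | cons k ks ih =>
    intro out memo hinv
    obtain ⟨h1, h2⟩ := pvAscendUnwind_spec d hT (d.keys.length + 1) (some k) memo (hT (some k)) hinv
    simp only [List.foldl_cons]
    have hdef : pvPathOf d (d.keys.length + 1) memo k
        = (pvAscend d (d.keys.length + 1) memo (some k)).1.reverse.foldl
            (fun acc node => (node :: acc.1, acc.2.insert node (node :: acc.1)))
            ((match (pvAscend d (d.keys.length + 1) memo (some k)).2 with
              | none => ([] : List Int)
              | some j => memo.getD j []), memo) := rfl
    have h1' : (pvPathOf d (d.keys.length + 1) memo k).1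
        = pvFindParents d (d.keys.length + 1) (some k) [] := by rw [hdef]; exact h1
    rw [ih _ _ (by rw [hdef]; exact h2), h1']

-- ===== VERDICT (by name: the statement is the Claim_ definition above) =====
theorem build_parent_map_spec : Claim_equal_build_parent_map := by
  intro pairs _ hpre
  unfold Spec_build_parent_map build_parent_map build_parent_map_alt
  have hT := pvTerm_all pairs hpre
  rw [pvFold_eq (pvPD pairs) hT _ _ _ (by intro k v h; simp [PySem.Dict.get?_empty] at h)]
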